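/-
  SEGMENT .5 OF `vorbis_decode_packet_rest` (0x111000–0x111260: the EOP test, `step2_flag[0..1] = 1`, the neighbors / predict_point
  loop of floor decoding; stb_vorbis_fixed.c 3264–3294) SPLIT IN THREE: the assertions at the two new cut points (the loop head
  0x11109c = `cut10`, the return of predict_point 0x1111a6 = `cut11`), the claims of the three children, the composition
  `Seg5.of_parts` (pure logic: `ReachVia.trans` and the induction on the measure `251 − j`; no machine step), and the ONE carry
  lemma all three children close their exits with (`Stable.nb_carry`, an instance of `Stable.carry` / `config_carry` / `reads_carry`), and
  the geometry of the block at `finalY[i]` as plain arithmetic (`finalY_geom`).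

      .5a  0x111000–0x11104a                          `if (f->valid_bits == INVALID_BITS) goto error`, `step2_flag[0] = step2_flag[1] = 1`,
                                                      the spills `[0x38] = i`, `[0x30] = map`, `j = 2`
                                                      exits: At7a (`valid_bits = −1`), AtNbLoop … i 2
      .5b  0x11109c–0x1111a1, returns into 0x1111a6   `j < g->values`, `low = g->neighbors[j][0]`, `high = g->neighbors[j][1]`,
                                                      `predict_point(g->Xlist[j], g->Xlist[low], g->Xlist[high], finalY[low], finalY[high])`
                                                      exits: At6 (`values ≤ j`: 0x111265), AtNbPred … i j
      .5c  0x1111a6–0x111260 + 0x11104c–0x111098      `val = finalY[j]`, `highroom`, `lowroom`, `room`, the stores `step2_flag[low] =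
                                                      step2_flag[high] = step2_flag[j] = 1` / `step2_flag[j] = 0`, `finalY[j] = …`, `++j`:
                                                      ten paths, all through 0x111098 (`add r13d, 1`) into the loop head
                                                      exit: AtNbLoop … i (j + 1)

  WHAT IS LIVE AT THE TWO CUT POINTS, read off the disassembly (c/vorbis_f.dis 111000 … 111265):
      0x11109c  (loop head) reads r15 (= g: `[r15 + 0x638]` = `g->values`, the `neighbors` / `Xlist` loads), r13d (= j: `cmp`,
                `movsxd rbx, r13d`), `[rsp + 0x20]` (= finalY: 0x1110f8, 0x111117, 0x1111a8); the exit 0x111265 (.6) reads `[rsp + 0x38]`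
                (= i) and `[rsp + 0x30]` (= map). rbx, rbp, r12, r14 and the slots `[0x0] [0x8] [0x10] [0x18] [0x2c]` are WRITTEN before
                they are read (0x1110b5, 0x1110b8, 0x1110fd, 0x1110d4; 0x1110d1, 0x1110f1, 0x11110e, 0x11112c, 0x11116e): dead at the head.
      0x1111a6  (the return of predict_point: only rbx rbp r12 r13 r14 r15 and the stack slots survive the call) reads eax (= pred:
                `mov ebx, eax`; ANY value is handled: nothing is asserted of rax), r14 (= 2·j, `lea r14, [rbx + rbx]` at 0x1110d4 with
                rbx = j; `add r14, rcx` makes it `&finalY[j]`), `[rsp + 0x20]` (= finalY), `[rsp + 0x4c]` (= range: read at 0x1111c5,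
                "a value only" as in At3, not constrained), the dwords `[rsp + 0x8]` (= high, 0x1111ee: the index of
                `step2_flag[high]`) and `[rsp]` (= low, 0x111209), r13d (= j: 0x111223 / 0x11107c the index of `step2_flag[j]`,
                0x111098 `++j`), r15 (the next round). rbx, rbp, r12 and the slots `[0x10] [0x18] [0x2c]` are written before they
                are read (0x1111a6, 0x1111ee / 0x11107c, 0x1111c1; 0x1111d9 / 0x11104f, 0x1111bc, 0x1111cb); the qword `[rsp + 0x8]` is
                overwritten at 0x1111f3 AFTER `high` was read.
-/
import Vorbis.Spec.PacketRest
import Vorbis.Spec.PacketRestFrame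
namespace Vorbis.Spec.vorbis_decode_packet_rest
open X86 X86.User Asan Vorbis Vorbis.Spec

/- `omega` on the window arithmetic of this file (`R − 3856`, `R − 2872` …) needs more than the default recursion depth. -/
set_option maxRecDepth 40000

variable {others : List Obj} {frames : List (Nat × FrameLayout)} {len : Nat} {Ar : Arena} {stored room : Int}
  {ysz : Nat → Nat} {mem mem' : Mem} {f : Nat}

/-! ### The stores of segment .5 and STABLE: an instance of `Stable.carry` -/

/-- **`SpanOK` of a span inside the function's frame objects** (disjunct 1 of `SpanOK`, LAST arm: `R − 2872 ≤ lo`, `hi ≤ R − 48`):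
`residue_buffers`, `step2_flag` (`[R − 2680, R − 2424)` = `[steady rsp + 0x140, + 0x240)`), `zero_channel`, `really_zero_channel`.
Usage: `SpanOK.frameObj (by simp only []; omega) (by simp only []; omega)`. -/
theorem SpanOK.frameObj {R : Nat} {w : Span} (h1 : R - 2872 ≤ w.lo) (h2 : w.hi ≤ R - 48) : SpanOK ysz mem R f w :=
  Or.inl ⟨by omega, h2, Or.inr (Or.inr (Or.inr h1))⟩

/-- **The three windows a piece of segment .5 may write**, relative to the state it starts from (memory `mem`), `e` = the
function's entry state, `c` = the channel: the scratch part of the own frame and everything below it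
(`[entry rsp − 3856, steady rsp + 0x3c)`: the callees' frames, the return addresses of the check calls, the spill slots
`[rsp] … [rsp + 0x38]`), the frame object `step2_flag` (`[steady rsp + 0x140, + 0x240)`), and the whole block at `finalY[c]`.
Give `u_same` this list (`unfold nbWins; u_same`). -/
def nbWins (ysz : Nat → Nat) (e : State) (mem : Mem) (c : Nat) : List Span :=
  [⟨(e.reg .rsp).toNat - 3856, (e.reg .rsp).toNat - 2940⟩,
   ⟨(e.reg .rsp).toNat - 2680, (e.reg .rsp).toNat - 2424⟩,
   ⟨stb_vorbis.finalY mem (fOf e) c, stb_vorbis.finalY mem (fOf e) c + ysz c⟩]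

/-- **Every window of `nbWins` is a `SpanOK` span** (`SpanOK.below`, `SpanOK.frameObj`, `SpanOK.finalY`: the block at `finalY[c]`
has at least 4 bytes, FY1 and FL8). `hR1 = Frame.entry.room`. -/
theorem nbWins_ok {e : State} {c : Nat}
    (h : DecodeInv others frames len Ar stored room ysz mem (fOf e)) (hc : (c : Int) < stb_vorbis.channels mem (fOf e))
    (hR1 : 0x700000 + 3856 ≤ (e.reg .rsp).toNat) :
    ∀ w, w ∈ nbWins ysz e mem c → SpanOK ysz mem (e.reg .rsp).toNat (fOf e) w := by
  intro w hw
  simp only [nbWins, List.mem_cons, List.mem_nil_iff, or_false] at hw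
  rcases hw with rfl | rfl | rfl
  · exact SpanOK.below (by simp only []; omega) (by simp only []; omega)
  · exact SpanOK.frameObj (by simp only []; omega) (by simp only []; omega)
  · obtain ⟨_, hsz⟩ := h.fy c hc
    have h1 := h.config.floor.toFloorShape.FL1
    have h0 : ((0 : Nat) : Int) < stb_vorbis.floor_count mem (fOf e) := by omega
    have hv := (h.config.floor.floor (IsFloor.of_lt h0)).values_bounds
    have hs0 := hsz 0 h0
    exact SpanOK.finalY c hc (Nat.le_refl _) (by simp only []; omega) (Nat.le_refl _)

/-- **STABLE, and what segment .5 needs of the configuration, over the stores of the segment**: from a state `v` that satisfies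
STABLE to a state `s` with the steady stack pointer, the text unchanged, DF / MXCSR in order, whose memory differs from `v`'s only
inside `nbWins` and not in the shadow. `s` satisfies STABLE; channel `c` is still a channel with the same `finalY` block; `g` is
still a floor with the same `values`; the mapping record is the same. (`Stable.carry` + `config_carry` + `reads_carry`; `*f` is not
written at all, so `Bits` is `Bits.frame_fields`.) Every exit of .5a / .5b / .5c is closed with it:
`obtain ⟨hst, hi', hg', hval, efy, emap⟩ := Stable.nb_carry hat.toStable hat.i_lt hat.g w_rsp w_eq (by v_inv) hsame (by v_untouched)`. -/
theorem Stable.nb_carry {u₀ e v s : State} {ret : Word} {ls : Int} {mode : Nat} {c g : Nat}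
    (hst : Stable u₀ others frames len Ar stored room mode ysz e ret ls v)
    (hc : (c : Int) < stb_vorbis.channels v.mem (fOf e)) (hg : IsFloor v.mem (fOf e) g)
    (hrsp : s.reg .rsp = spOf e) (hcode : Vorbis.CodeOK u₀ s.mem) (habi : abiInv s)
    (hs : Mem.SameExcept (nbWins ysz e v.mem c) v.mem s.mem) (hun : ShadowUntouched v.mem s.mem) :
    Stable u₀ others frames len Ar stored room mode ysz e ret ls s ∧
      (c : Int) < stb_vorbis.channels s.mem (fOf e) ∧ IsFloor s.mem (fOf e) g ∧
      Floor1.values s.mem g = Floor1.values v.mem g ∧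
      stb_vorbis.finalY s.mem (fOf e) c = stb_vorbis.finalY v.mem (fOf e) c ∧
      mapOf s.mem (fOf e) (mOf e) = mapOf v.mem (fOf e) (mOf e) := by
  have hR1 : 0x700000 + 3856 ≤ (e.reg .rsp).toNat := hst.entry.room
  have hR2 : (e.reg .rsp).toNat + 8 ≤ 0x800000 := hst.entry.top
  have hinv := hst.inv
  have hsp := nbWins_ok hinv hc hR1
  obtain ⟨hobj, _⟩ := SpanOK.geom_obj hinv hR2
  -- the block at `finalY[c]` is a sample buffer: apart from `*f`
  have hd := hinv.sep.bufobj _ (SampleBuf.finalY c hc (ysz c) (hinv.fy c hc).1)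
  simp only [vblock, voff] at hd
  -- no window meets `*f`
  have hoff : ∀ w, w ∈ nbWins ysz e v.mem c → w.hi ≤ fOf e ∨ fOf e + 1808 ≤ w.lo := by
    intro w hw
    simp only [nbWins, List.mem_cons, List.mem_nil_iff, or_false] at hw
    rcases hw with rfl | rfl | rfl <;> simp only [] <;> omega
  have hbits : Bits (RunBlk Ar len) len s.mem (fOf e) := by
    apply hinv.fb.vorbis.bits.frame_fields
    apply Bits.SameFields.of_sameExcept hs
    all_goals
      intro w hw
      have := hoff w hw
      omega
  have hst' := Stable.carry hst hs hsp hun hrsp hcode habi hbits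
  obtain ⟨ech, emode, efy, efloor⟩ := config_carry hinv hR1 hR2 hs hsp
  have hm := mode_record_inside hst.pre
  have hC16 := hinv.config.header.HD1.2
  have hkfl := reads_carry hinv hR1 hR2 hs hsp _ ConfigOK.Reads.floor
  have hek := hinv.config.floor.toFloorShape.elem_kept hg hkfl
  refine ⟨hst', ?_, efloor g hg, Floor1.same_values hek.same hek.inside, efy c (by omega), (emode (mOf e) hm.1 hm.2).2⟩
  rw [ech]
  exact hc

/-- **Where the block at `finalY[c]` lies** (`c < channels`): it has at least 4 bytes (FY1, FL8), it is a setup block of the arena —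
above the text, below C00000H, off the stack region INCLUDING the two stack arguments (`0x800020 ≤`: see `SpanOK.geom`) — and apart
from `*f`. Plain arithmetic for the walker's disjointness search and for `side_code` goals of the stores `finalY[k] = …`: name the
block first (`obtain ⟨fy, hfy⟩ : ∃ fy, stb_vorbis.finalY v.mem (fOf e) i = fy := ⟨_, rfl⟩`, `rw [hfy] at …`). -/
theorem finalY_geom (h : DecodeInv others frames len Ar stored room ysz mem f) {c : Nat}
    (hc : (c : Int) < stb_vorbis.channels mem f) :
    4 ≤ ysz c ∧ Vorbis.L.textHi ≤ stb_vorbis.finalY mem f c ∧ stb_vorbis.finalY mem f c + ysz c ≤ 0xC00000 ∧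
      (stb_vorbis.finalY mem f c + ysz c ≤ 0x700000 ∨ 0x800020 ≤ stb_vorbis.finalY mem f c) ∧
      (stb_vorbis.finalY mem f c + ysz c ≤ f ∨ f + 1808 ≤ stb_vorbis.finalY mem f c) := by
  obtain ⟨hblk, hsz⟩ := h.fy c hc
  have hC : SampleBuf (RunBlk Ar len) mem f ⟨stb_vorbis.finalY mem f c, ysz c⟩ := SampleBuf.finalY c hc (ysz c) hblk
  have h1 := h.config.floor.toFloorShape.FL1
  have h0 : ((0 : Nat) : Int) < stb_vorbis.floor_count mem f := by omega
  have hv := (h.config.floor.floor (IsFloor.of_lt h0)).values_bounds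
  have hs0 := hsz 0 h0
  have h4 : 4 ≤ ysz c := by omega
  have hd := h.sep.bufobj _ hC
  simp only [vblock, voff] at hd
  have hA := h.arena
  have htext := h.arenaText
  rcases h.buf _ hC with hz | hb
  · simp only [] at hz
    omega
  · have hr := hA.block_range (p := stb_vorbis.finalY mem f c) (n := ysz c) hb
    have hl := le_r8 (ysz c)
    have a1 := hA.AR1
    have a1x := hA.AR1x
    have a2 := hA.AR2
    refine ⟨h4, ?_, ?_, ?_, ?_⟩ <;> omega

/-! ### The assertions at the two new cut points -/

/-- **Cut 0x11109c (`cut10`): the head of the neighbors / predict_point loop** (line 3266, before the check of `g->values`), channel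
`i`, counter `j`: STABLE ∧ `r15 = g` ∧ `r13 = j`, `2 ≤ j ≤ values` ∧ `[0x20] = finalY = f->finalY[i]` ∧ `[0x38] = i < C` ∧
`[0x30] = map`. It is `At6` with the counter and another `rip`. Nothing of `step2_flag`'s contents, nothing of `finalY`'s. -/
structure AtNbLoop (u₀ : State) (others : List Obj) (frames : List (Nat × FrameLayout)) (len : Nat) (Ar : Arena)
    (stored room : Int) (mode : Nat) (ysz : Nat → Nat) (u : State) (ret : Word)
    (i j : Nat) (v : State) : Prop
    extends Stable u₀ others frames len Ar stored room mode ysz u ret (lsOf u) v where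
  /-- the loop head: reached from 0x11104a (`j = 2`) and from 0x111098 (`add r13d, 1` falls through) -/
  rip : v.rip = Vorbis.L.vorbis_decode_packet_rest.cut10
  /-- `r15 = g`, the Floor1 record of channel `i` (`At5.g`; r15 is not written in the segment) -/
  g : IsFloor v.mem (fOf u) (v.reg .r15).toNat
  /-- the counter, the WHOLE register (0x111047 `mov r13d, eax`, 0x111098 `add r13d, 1`: both zero the upper half) -/
  r13 : v.reg .r13 = UInt64.ofNat j
  /-- the loop starts at `j = 2` -/
  j_ge : 2 ≤ j
  /-- `j ≤ g->values` (≤ 250, FL8): the measure of the loop is `251 − j`; `j = values` leaves through 0x1110af -/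
  j_le : (j : Int) ≤ Floor1.values v.mem (v.reg .r15).toNat
  /-- the spill of the channel index (0x11103d), read again at 0x111265 (`At6.slot_i`) -/
  slot_i : slot32 u v 0x38 = i
  /-- `i < f->channels` -/
  i_lt : (i : Int) < stb_vorbis.channels v.mem (fOf u)
  /-- the spill of `finalY = f->finalY[i]` (`At5.slot_finalY`; read at 0x1110f8, 0x111117, 0x1111a8) -/
  slot_finalY : slot64 u v 0x20 = stb_vorbis.finalY v.mem (fOf u) i
  /-- the spill of `map` (0x111042), read again at 0x11126a (`At6.slot_map`) -/
  slot_map : slot64 u v 0x30 = mapOf v.mem (fOf u) (mOf u)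

/-- **Cut 0x1111a6 (`cut11` = `ret48`): the return of `predict_point`** (line 3271, before `mov ebx, eax`), channel `i`, counter
`j`: `AtNbLoop`'s fields with `j < values`, and what the rest of the round still reads: `r14 = 2·j` (`add r14, rcx` makes it
`&finalY[j]`), the dwords `[rsp] = low` and `[rsp + 8] = high`, zero-extended bytes (indices of `step2_flag[256]`: no bound from
FL10 is needed after the call). rax = `pred`: ANY value (predict_point's post `rax < 2^32` is not needed: only eax is read).
`[rsp + 0x4c] = range` is read but not constrained. -/
structure AtNbPred (u₀ : State) (others : List Obj) (frames : List (Nat × FrameLayout)) (len : Nat) (Ar : Arena)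
    (stored room : Int) (mode : Nat) (ysz : Nat → Nat) (u : State) (ret : Word)
    (i j : Nat) (v : State) : Prop
    extends Stable u₀ others frames len Ar stored room mode ysz u ret (lsOf u) v where
  /-- the return address of the call at 0x1111a1 -/
  rip : v.rip = Vorbis.L.vorbis_decode_packet_rest.cut11
  /-- `r15 = g` (callee-saved) -/
  g : IsFloor v.mem (fOf u) (v.reg .r15).toNat
  /-- the counter (callee-saved; `step2_flag[j]` at 0x111223 / 0x11107c, `++j` at 0x111098) -/
  r13 : v.reg .r13 = UInt64.ofNat j
  /-- `r14 = 2·j` (0x1110d4 `lea r14, [rbx + rbx]`, rbx = `movsxd` of r13d; callee-saved): the byte offset of `finalY[j]` -/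
  r14 : v.reg .r14 = UInt64.ofNat (2 * j)
  /-- the loop starts at `j = 2` -/
  j_ge : 2 ≤ j
  /-- `j < g->values` (the branch 0x1110af was not taken): `finalY[j]` is inside the block (FY1), `j < 250` inside `step2_flag` -/
  j_lt : (j : Int) < Floor1.values v.mem (v.reg .r15).toNat
  /-- the dword `[rsp] = low = g->neighbors[j][0]`, a zero-extended byte (0x1110cd, 0x1110d1): the index of `step2_flag[low]` -/
  slot_low : slot32 u v 0x0 < 256
  /-- the dword `[rsp + 8] = high = g->neighbors[j][1]`, a zero-extended byte (0x1110ee, 0x1110f1): the index of `step2_flag[high]` -/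
  slot_high : slot32 u v 0x8 < 256
  /-- the spill of the channel index -/
  slot_i : slot32 u v 0x38 = i
  /-- `i < f->channels` -/
  i_lt : (i : Int) < stb_vorbis.channels v.mem (fOf u)
  /-- the spill of `finalY = f->finalY[i]` (read at 0x1111a8) -/
  slot_finalY : slot64 u v 0x20 = stb_vorbis.finalY v.mem (fOf u) i
  /-- the spill of `map` -/
  slot_map : slot64 u v 0x30 = mapOf v.mem (fOf u) (mOf u)

/-! ### The claims of the three children -/

/-- **Segment .5a, 0x111000–0x11104a** (lines 3264–3266): `valid_bits = −1` → .7 entry A; otherwise `step2_flag[0] = step2_flag[1]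
= 1`, the spills of `i` and `map`, `j = 2` → the loop head (`AtNbLoop … i 2`). -/
def Seg5a (Lay : Layout) (μ : Microarch) (u₀ : State) : Prop :=
  ∀ (others : List Obj) (frames : List (Nat × FrameLayout)) (len : Nat) (Ar : Arena) (stored room : Int)
      (mode : Nat) (ysz : Nat → Nat) (u : State) (ret : Word) (i : Nat) (v : State),
    (At5 u₀ others frames len Ar stored room mode ysz u ret i v) →
    ReachVia Lay μ Vorbis.WayInv v (fun w => At7a u₀ others frames len Ar stored room mode ysz u ret i w ∨ AtNbLoop u₀ others frames len Ar stored room mode ysz u ret i 2 w)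

/-- **Segment .5b, 0x11109c–0x1111a1** (lines 3266–3271): `values ≤ j` → .6; otherwise `low`, `high`, the five loads of the
arguments, and `predict_point` returns into 0x1111a6 (`AtNbPred … i j`). -/
def Seg5b (Lay : Layout) (μ : Microarch) (u₀ : State) : Prop :=
  ∀ (others : List Obj) (frames : List (Nat × FrameLayout)) (len : Nat) (Ar : Arena) (stored room : Int)
      (mode : Nat) (ysz : Nat → Nat) (u : State) (ret : Word) (i j : Nat) (v : State),
    (AtNbLoop u₀ others frames len Ar stored room mode ysz u ret i j v) →
    ReachVia Lay μ Vorbis.WayInv v (fun w => At6 u₀ others frames len Ar stored room mode ysz u ret i w ∨ AtNbPred u₀ others frames len Ar stored room mode ysz u ret i j w)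

/-- **Segment .5c, 0x1111a6–0x111260 + 0x11104c–0x111098** (lines 3272–3294): `val = finalY[j]`, the rooms, the stores into
`step2_flag` and `finalY[j]`, `++j` → the loop head (`AtNbLoop … i (j + 1)`). -/
def Seg5c (Lay : Layout) (μ : Microarch) (u₀ : State) : Prop :=
  ∀ (others : List Obj) (frames : List (Nat × FrameLayout)) (len : Nat) (Ar : Arena) (stored room : Int)
      (mode : Nat) (ysz : Nat → Nat) (u : State) (ret : Word) (i j : Nat) (v : State),
    (AtNbPred u₀ others frames len Ar stored room mode ysz u ret i j v) →
    ReachVia Lay μ Vorbis.WayInv v (fun w => AtNbLoop u₀ others frames len Ar stored room mode ysz u ret i (j + 1) w)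

/-! ### The composition -/

/-- **One round of the loop** from .5b and .5c: from the loop head with counter `j` to the loop head with counter `j + 1`, or
(`values ≤ j`) to the entry of segment .6. -/
theorem Seg5.round {Lay : Layout} {μ : Microarch} {u₀ : State} (hb : Seg5b Lay μ u₀) (hc : Seg5c Lay μ u₀)
    {u : State} {ret : Word} {mode : Nat} {i j : Nat} {v : State}
    (hat : AtNbLoop u₀ others frames len Ar stored room mode ysz u ret i j v) :
    ReachVia Lay μ Vorbis.WayInv v (fun w => AtNbLoop u₀ others frames len Ar stored room mode ysz u ret i (j + 1) w ∨
      At6 u₀ others frames len Ar stored room mode ysz u ret i w) := by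
  refine (hb others frames len Ar stored room mode ysz u ret i j v hat).trans ?_
  intro vb hvb
  rcases hvb with h6 | hp
  · exact ReachVia.done (Or.inr h6)
  · refine (hc others frames len Ar stored room mode ysz u ret i j vb hp).trans ?_
    intro vc hl
    exact ReachVia.done (Or.inl hl)

/-- **The loop**: from its head with counter `j` the machine reaches the entry of segment .6. Induction on the measure
`k = 251 − j` (`AtNbLoop.j_le` and FL8: `j ≤ values ≤ 250`, so `k = 0` is impossible). -/
theorem Seg5.loop {Lay : Layout} {μ : Microarch} {u₀ : State} (hb : Seg5b Lay μ u₀) (hc : Seg5c Lay μ u₀)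
    {u : State} {ret : Word} {mode : Nat} {i : Nat} :
    ∀ (k j : Nat), j + k = 251 → ∀ v, AtNbLoop u₀ others frames len Ar stored room mode ysz u ret i j v →
      ReachVia Lay μ Vorbis.WayInv v (fun w => At6 u₀ others frames len Ar stored room mode ysz u ret i w) := by
  intro k
  induction k with
  | zero =>
    intro j hj v hat
    have hv := (hat.inv.config.floor.floor hat.g).values_bounds
    have hle := hat.j_le
    omega
  | succ k ih =>
    intro j hj v hat
    refine (Seg5.round hb hc hat).trans ?_
    intro w hw
    rcases hw with hl | h6
    · exact ih (j + 1) (by omega) w hl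
    · exact ReachVia.done h6

/-- **The composition of segment .5 from its three parts**: .5a leaves to .7 entry A or reaches the loop head with `j = 2`; the
loop (`Seg5.loop`: rounds of .5b then .5c, measure `251 − j`) reaches the entry of .6. Pure logic. -/
theorem Seg5.of_parts {Lay : Layout} {μ : Microarch} {u₀ : State}
    (ha : Seg5a Lay μ u₀) (hb : Seg5b Lay μ u₀) (hc : Seg5c Lay μ u₀) : Seg5 Lay μ u₀ := by
  intro others frames len Ar stored room mode ysz u ret i v hat
  refine (ha others frames len Ar stored room mode ysz u ret i v hat).trans ?_
  intro va hva
  rcases hva with h7 | hl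
  · exact ReachVia.done (Or.inl h7)
  · refine (Seg5.loop hb hc 249 2 rfl va hl).trans ?_
    intro w h6
    exact ReachVia.done (Or.inr h6)

end Vorbis.Spec.vorbis_decode_packet_rest
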